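-- pv_equiv track=rewrite | github.com/hechem20/backendmath | prim.py | derivp
-- ===== SOURCE A (Python) =====
-- def derivp(n):
--     l = []
--     for i in range(1, len(n)):
--         if (n[i] == '+' or n[i] == '-') and (n[:i].count(')') == n[:i].count('(')):
--             l.append(i)
--     if l == [] or l[0] != 0:
--         l.insert(0, 0)
--     l.append(len(n))
--     return l
-- ===== SOURCE B (Python) =====
-- def derivp(n):
--     res = [0]
--     bal = 0
--     for i, c in enumerate(n):
--         if i > 0 and (c == '+' or c == '-') and bal == 0:
--             res.append(i)
--         bal += (c == '(') - (c == ')')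
--     res.append(len(n))
--     return res
-- ===== Notes on version B (the rewrite author's own statement) =====
-- stated objective: alternative
-- what changed: single left-to-right pass that maintains a running parenthesis balance instead of recounting '(' and ')' in the prefix n[:i] at every candidate index
import Mathlib
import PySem

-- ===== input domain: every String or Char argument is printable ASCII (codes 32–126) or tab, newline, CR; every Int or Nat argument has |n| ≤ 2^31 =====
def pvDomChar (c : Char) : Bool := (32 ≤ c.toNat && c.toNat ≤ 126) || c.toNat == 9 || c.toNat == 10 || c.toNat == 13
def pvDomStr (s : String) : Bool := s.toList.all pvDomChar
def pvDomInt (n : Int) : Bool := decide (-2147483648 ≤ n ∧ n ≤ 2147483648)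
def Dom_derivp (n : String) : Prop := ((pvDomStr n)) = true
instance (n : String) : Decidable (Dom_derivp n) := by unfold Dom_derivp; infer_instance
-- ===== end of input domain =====

-- B changes the algorithm: one pass carrying a running parenthesis balance instead of recounting '(' and ')' in the prefix at each '+'/'-' (alternative; not measured faster).

-- ===== PORT A =====
-- literal transliteration of A: scan i in range(1, len(n)); the condition recounts ')' and '(' in n[:i]
def derivp (n : String) : List Int :=
  let cs := n.toList
  let l : List Int :=
    (PySem.List.pyRange 1 (cs.length : Int) 1).foldl
      (fun l i =>
        if (PySem.List.pyGet? cs i = some '+' ∨ PySem.List.pyGet? cs i = some '-')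
            ∧ ((PySem.List.slice cs none (some i)).count ')'
                = (PySem.List.slice cs none (some i)).count '(')
        then l ++ [i] else l) []
  let l := if l = [] ∨ l[0]? ≠ some 0 then 0 :: l else l
  l ++ [(cs.length : Int)]

-- ===== PORT B =====
-- literal transliteration of Source B: fold over enumerate(n) carrying (res, bal)
def derivp_alt (n : String) : List Int :=
  let cs := n.toList
  let st : List Int × Int :=
    (PySem.List.enumerate cs 0).foldl
      (fun (st : List Int × Int) p =>
        let res := if 0 < p.1 ∧ (p.2 = '+' ∨ p.2 = '-') ∧ st.2 = 0 then st.1 ++ [p.1] else st.1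
        (res, st.2 + ((if p.2 = '(' then (1 : Int) else 0) - (if p.2 = ')' then (1 : Int) else 0))))
      ([0], 0)
  st.1 ++ [(cs.length : Int)]

-- ===== PRECONDITION & SPEC =====
def Spec_derivp (n : String) (out : List Int) : Prop := out = derivp_alt n
instance (n : String) (out : List Int) : Decidable (Spec_derivp n out) := by unfold Spec_derivp; infer_instance

-- ===== CLAIM (what is proved, stated in full; the proofs are below) =====
def Claim_equal_derivp : Prop := ∀ (n : String), Dom_derivp n → Spec_derivp n (derivp n)

-- ===== LEMMAS AND PROOFS =====

-- running balance of the length-k prefix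
def pvBal (cs : List Char) (k : Nat) : Int :=
  ((cs.take k).count '(' : Int) - ((cs.take k).count ')' : Int)

-- the common selection predicate: top-level '+'/'-' at index i ≥ 1
def pvSel (cs : List Char) (i : Int) : Bool :=
  decide (0 < i ∧ (cs.getD i.toNat ' ' = '+' ∨ cs.getD i.toNat ' ' = '-') ∧ pvBal cs i.toNat = 0)

theorem pvBal_succ (cs : List Char) (k : Nat) (hk : k < cs.length) :
    pvBal cs (k + 1)
      = pvBal cs k + ((if cs[k] = '(' then (1 : Int) else 0) - (if cs[k] = ')' then (1 : Int) else 0)) := by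
  unfold pvBal
  rw [List.take_add_one, List.getElem?_eq_getElem hk]
  simp only [Option.toList_some, List.count_append]
  by_cases h1 : cs[k] = '(' <;> by_cases h2 : cs[k] = ')' <;>
    simp [h1, h2] <;> ring

theorem A_filter (cs : List Char) :
    ((PySem.List.pyRange 1 (cs.length : Int) 1).filter
      (fun i => decide ((PySem.List.pyGet? cs i = some '+' ∨ PySem.List.pyGet? cs i = some '-')
            ∧ ((PySem.List.slice cs none (some i)).count ')'
                = (PySem.List.slice cs none (some i)).count '('))))
    = (PySem.List.pyRange 1 (cs.length : Int) 1).filter (pvSel cs) := by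
  apply List.filter_congr
  intro i hi
  rw [PySem.List.mem_pyRange_one] at hi
  obtain ⟨h1, h2⟩ := hi
  obtain ⟨k, rfl⟩ : ∃ k : Nat, (k : Int) = i := ⟨i.toNat, Int.toNat_of_nonneg (by omega)⟩
  have hk : k < cs.length := by exact_mod_cast h2
  have hk1 : 1 ≤ k := by exact_mod_cast h1
  rw [PySem.List.slice_to_natCast]
  have hget : cs[k]? = some cs[k] := List.getElem?_eq_getElem hk
  have hgets : PySem.List.pyGet? cs (k : Int) = some cs[k] := by
    simp [PySem.List.pyGet?, PySem.List.pyIdx?, hk]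
  have hgetD : cs.getD k ' ' = cs[k] := by simp [List.getD, hget]
  simp only [pvSel, pvBal, Int.toNat_natCast, hgets, hgetD, decide_eq_decide]
  constructor
  · rintro ⟨hpm, hcnt⟩
    refine ⟨by exact_mod_cast h1, ?_, by omega⟩
    rcases hpm with h | h <;> [left; right] <;> injection h
  · rintro ⟨-, hpm, hbal⟩
    refine ⟨?_, by omega⟩
    rcases hpm with h | h <;> simp [h]

theorem B_loop (cs : List Char) : ∀ (m : Nat) (k : Nat) (acc : List Int),
    m = cs.length - k → k ≤ cs.length →
    ((PySem.List.enumerate (cs.drop k) (k : Int)).foldl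
      (fun (st : List Int × Int) p =>
        (if 0 < p.1 ∧ (p.2 = '+' ∨ p.2 = '-') ∧ st.2 = 0 then st.1 ++ [p.1] else st.1,
         st.2 + ((if p.2 = '(' then (1 : Int) else 0) - (if p.2 = ')' then (1 : Int) else 0))))
      (acc, pvBal cs k)).1
    = acc ++ (PySem.List.pyRange (k : Int) (cs.length : Int) 1).filter (pvSel cs) := by
  intro m
  induction m with
  | zero =>
    intro k acc hm hk
    have : k = cs.length := by omega
    subst this
    simp [PySem.List.pyRange_one_eq_nil (le_refl _)]
  | succ m ih =>
    intro k acc hm hk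
    have hklt : k < cs.length := by omega
    rw [List.drop_eq_getElem_cons hklt, PySem.List.enumerate_cons, List.foldl_cons]
    have hcons : PySem.List.pyRange (k : Int) (cs.length : Int) 1
        = (k : Int) :: PySem.List.pyRange ((k : Int) + 1) (cs.length : Int) 1 :=
      PySem.List.pyRange_one_cons (by exact_mod_cast hklt)
    rw [hcons, List.filter_cons]
    have hb : pvBal cs k + ((if cs[k] = '(' then (1 : Int) else 0) - (if cs[k] = ')' then (1 : Int) else 0))
        = pvBal cs (k + 1) := (pvBal_succ cs k hklt).symm
    have hstep := ih (k + 1)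
      (if 0 < (k : Int) ∧ (cs[k] = '+' ∨ cs[k] = '-') ∧ pvBal cs k = 0 then acc ++ [(k : Int)] else acc)
      (by omega) (by omega)
    push_cast at hstep
    simp only [hb]
    rw [hstep]
    have hsel : pvSel cs (k : Int)
        = decide (0 < (k : Int) ∧ (cs[k] = '+' ∨ cs[k] = '-') ∧ pvBal cs k = 0) := by
      simp [pvSel, List.getD, List.getElem?_eq_getElem hklt]
    rw [hsel]
    simp only [decide_eq_true_eq]
    by_cases hc : 0 < (k : Int) ∧ (cs[k] = '+' ∨ cs[k] = '-') ∧ pvBal cs k = 0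
    · rw [if_pos hc, if_pos hc]; simp
    · rw [if_neg hc, if_neg hc]

theorem filter_sel_zero (cs : List Char) :
    (PySem.List.pyRange 0 (cs.length : Int) 1).filter (pvSel cs)
      = (PySem.List.pyRange 1 (cs.length : Int) 1).filter (pvSel cs) := by
  rcases Nat.eq_zero_or_pos cs.length with h | h
  · simp [h, PySem.List.pyRange_one_eq_nil]
  · rw [PySem.List.pyRange_one_cons (by exact_mod_cast h), List.filter_cons]
    simp [pvSel]

theorem head_filter_ne_zero (cs : List Char) :
    ((PySem.List.pyRange 1 (cs.length : Int) 1).filter (pvSel cs)) = []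
    ∨ ((PySem.List.pyRange 1 (cs.length : Int) 1).filter (pvSel cs))[0]? ≠ some 0 := by
  rcases hL : (PySem.List.pyRange 1 (cs.length : Int) 1).filter (pvSel cs) with _ | ⟨x, L'⟩
  · exact Or.inl rfl
  · right
    have hx : x ∈ (PySem.List.pyRange 1 (cs.length : Int) 1).filter (pvSel cs) := by
      rw [hL]; exact List.mem_cons_self
    have := PySem.List.mem_pyRange_one.mp (List.mem_of_mem_filter hx)
    simp only [List.getElem?_cons_zero]
    intro hcontra
    have : x = 0 := by injection hcontra
    omega

theorem pv_main (cs : List Char) :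
    (let l : List Int :=
      (PySem.List.pyRange 1 (cs.length : Int) 1).foldl
        (fun l i =>
          if (PySem.List.pyGet? cs i = some '+' ∨ PySem.List.pyGet? cs i = some '-')
              ∧ ((PySem.List.slice cs none (some i)).count ')'
                  = (PySem.List.slice cs none (some i)).count '(')
          then l ++ [i] else l) []
     let l := if l = [] ∨ l[0]? ≠ some 0 then 0 :: l else l
     l ++ [(cs.length : Int)])
    = ((PySem.List.enumerate cs 0).foldl
        (fun (st : List Int × Int) p =>
          (if 0 < p.1 ∧ (p.2 = '+' ∨ p.2 = '-') ∧ st.2 = 0 then st.1 ++ [p.1] else st.1,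
           st.2 + ((if p.2 = '(' then (1 : Int) else 0) - (if p.2 = ')' then (1 : Int) else 0))))
        ([0], 0)).1 ++ [(cs.length : Int)] := by
  have hB := B_loop cs cs.length 0 [0] (by omega) (by omega)
  simp only [Nat.cast_zero, List.drop_zero, pvBal, List.take_zero, List.count_nil,
    Nat.cast_zero, sub_zero] at hB
  rw [hB, filter_sel_zero]
  simp only [PySem.List.foldl_append_ite_eq_filter, List.nil_append, A_filter]
  rcases head_filter_ne_zero cs with h | h
  · rw [if_pos (Or.inl h), h]
    rfl
  · rw [if_pos (Or.inr h)]
    simp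

-- ===== VERDICT (by name: the statement is the Claim_ definition above) =====
theorem derivp_spec : Claim_equal_derivp := by
  intro n _
  exact pv_main n.toList
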